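-- pv_equiv track=rewrite | github.com/eastmountaincode/portfolio | Sliding Puzzle Project (Python OOP)/CodeResources/helper_functions.py | checkBlankLeft
-- ===== SOURCE A (Python) =====
-- import math
--
-- def checkBlankLeft(clickedTile, blankTile, totalPieces):
--     '''
--         Check if the blank tile is to the left of the clicked tile
--
--         Parameters:
--             clickedTile (int): floorID of the clicked tile
--             blankTile (int): floorID of the blank tile
--             totalPiece (int): total # of pieces in the puzzle
--
--         Returns:
--             equalityCheckLeft (bool): returns True if the floorID
--                 of the blank tile is one less than the floorID
--                 of the clicked tile
--             edgeCheckLeft (bool): returns True if the clicked tile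
--                 is not in one of the locations on the grid that if
--                 it moved to the left, it would go outside the grid.
--
--     '''
--     equalityCheckLeft = False
--     edgeCheckLeft = False
--     if clickedTile - 1 == blankTile:
--         equalityCheckLeft = True
--
--         sqrtOfPuzz = int(math.sqrt(totalPieces))
--         invalid = [(sqrtOfPuzz * i) for i in range(1, sqrtOfPuzz)]
--         if clickedTile not in invalid:
--             edgeCheckLeft = True
--     return equalityCheckLeft, edgeCheckLeft
-- ===== SOURCE B (Python) =====
-- import math
--
-- def checkBlankLeft(clickedTile, blankTile, totalPieces):
--     if clickedTile - 1 != blankTile: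
--         return False, False
--     s = math.isqrt(totalPieces)
--     onLeftEdge = s >= 2 and s <= clickedTile <= s * (s - 1) and clickedTile % s == 0
--     return True, not onLeftEdge
-- ===== Notes on version B (the rewrite author's own statement) =====
-- stated objective: simpler
-- what changed: Replaces building the list of left-edge tile ids and a linear membership scan with a constant-time modular-arithmetic test (divisible by sqrt and within [sqrt, sqrt*(sqrt-1)]).
import Mathlib
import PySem

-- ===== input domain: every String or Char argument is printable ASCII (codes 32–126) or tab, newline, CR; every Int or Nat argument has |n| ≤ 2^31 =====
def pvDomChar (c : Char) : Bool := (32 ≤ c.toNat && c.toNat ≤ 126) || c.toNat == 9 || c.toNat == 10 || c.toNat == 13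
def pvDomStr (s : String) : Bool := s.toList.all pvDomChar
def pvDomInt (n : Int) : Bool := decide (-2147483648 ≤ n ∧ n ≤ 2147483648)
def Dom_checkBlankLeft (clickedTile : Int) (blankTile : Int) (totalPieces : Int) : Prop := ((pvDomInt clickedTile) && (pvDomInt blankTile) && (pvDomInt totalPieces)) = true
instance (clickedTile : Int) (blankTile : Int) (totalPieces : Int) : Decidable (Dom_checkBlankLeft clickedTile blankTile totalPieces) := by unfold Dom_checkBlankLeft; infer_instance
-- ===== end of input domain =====

-- B replaces A's left-edge list construction + membership scan with a constant-time
-- modular-arithmetic test (objective: simpler). Return-value equivalence only; no mutation.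

-- ===== PORT A =====
-- int(math.sqrt(totalPieces)): for 0 ≤ totalPieces ≤ 2^31 (guaranteed by Dom + Pre_),
-- the float sqrt is exact enough that int(math.sqrt(n)) = isqrt(n) = Nat.sqrt; ported as such.
def checkBlankLeft (clickedTile : Int) (blankTile : Int) (totalPieces : Int) : Bool × Bool :=
  let equalityCheckLeft := false
  let edgeCheckLeft := false
  if clickedTile - 1 == blankTile then
    let equalityCheckLeft := true
    let sqrtOfPuzz : Int := Int.ofNat (Nat.sqrt totalPieces.toNat)
    let invalid : List Int := (PySem.List.pyRange 1 sqrtOfPuzz 1).map (fun i => sqrtOfPuzz * i)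
    if !(invalid.contains clickedTile) then
      (equalityCheckLeft, true)
    else
      (equalityCheckLeft, edgeCheckLeft)
  else
    (equalityCheckLeft, edgeCheckLeft)

-- ===== PORT B =====
-- math.isqrt(totalPieces) ported as Nat.sqrt (exact for totalPieces ≥ 0, which Pre_ guarantees here)
def checkBlankLeft_alt (clickedTile : Int) (blankTile : Int) (totalPieces : Int) : Bool × Bool :=
  if clickedTile - 1 != blankTile then
    (false, false)
  else
    let s : Int := Int.ofNat (Nat.sqrt totalPieces.toNat)
    let onLeftEdge : Bool :=
      decide (2 ≤ s) && decide (s ≤ clickedTile) && decide (clickedTile ≤ s * (s - 1)) &&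
        (PySem.Int.mod clickedTile s == 0)
    (true, !onLeftEdge)

-- ===== PRECONDITION & SPEC =====
-- math.sqrt (A) and math.isqrt (B) both raise ValueError on negative totalPieces; the sqrt is
-- only computed when the equality branch is taken, so exactly those inputs are excluded.
def Pre_checkBlankLeft (clickedTile : Int) (blankTile : Int) (totalPieces : Int) : Prop :=
  clickedTile - 1 = blankTile → 0 ≤ totalPieces
instance (clickedTile : Int) (blankTile : Int) (totalPieces : Int) : Decidable (Pre_checkBlankLeft clickedTile blankTile totalPieces) := by unfold Pre_checkBlankLeft; infer_instance

def pvWitness_checkBlankLeft : Int × Int × Int := (2, 1, 4)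

def Spec_checkBlankLeft (clickedTile : Int) (blankTile : Int) (totalPieces : Int) (out : Bool × Bool) : Prop := out = checkBlankLeft_alt clickedTile blankTile totalPieces
instance (clickedTile : Int) (blankTile : Int) (totalPieces : Int) (out : Bool × Bool) : Decidable (Spec_checkBlankLeft clickedTile blankTile totalPieces out) := by unfold Spec_checkBlankLeft; infer_instance

-- ===== CLAIM (what is proved, stated in full; the proofs are below) =====
def Claim_equal_checkBlankLeft : Prop := ∀ (clickedTile : Int) (blankTile : Int) (totalPieces : Int), Dom_checkBlankLeft clickedTile blankTile totalPieces → Pre_checkBlankLeft clickedTile blankTile totalPieces → Spec_checkBlankLeft clickedTile blankTile totalPieces (checkBlankLeft clickedTile blankTile totalPieces)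

-- ===== LEMMAS AND PROOFS =====

-- membership in A's 'invalid' list equals B's arithmetic test (for s ≥ 0)
theorem mem_invalid_iff (s c : Int) (hs : 0 ≤ s) :
    (c ∈ (PySem.List.pyRange 1 s 1).map (fun i => s * i)) ↔
      (2 ≤ s ∧ s ≤ c ∧ c ≤ s * (s - 1) ∧ PySem.Int.mod c s = 0) := by
  simp only [List.mem_map, PySem.List.mem_pyRange_one, PySem.Int.mod_eq_zero_iff_dvd]
  constructor
  · rintro ⟨i, ⟨h1, h2⟩, rfl⟩
    have hs2 : 2 ≤ s := by omega
    exact ⟨hs2, by nlinarith, by nlinarith, ⟨i, rfl⟩⟩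
  · rintro ⟨hs2, hlo, hhi, i, rfl⟩
    exact ⟨i, ⟨by nlinarith, by nlinarith⟩, rfl⟩

-- ===== VERDICT (by name: the statement is the Claim_ definition above) =====
theorem checkBlankLeft_spec : Claim_equal_checkBlankLeft := by
  intro c b t _ hpre
  unfold Spec_checkBlankLeft checkBlankLeft checkBlankLeft_alt
  by_cases h : c - 1 = b
  · simp only [h, beq_self_eq_true, if_true, bne_self_eq_false, Bool.false_eq_true, if_false]
    set s : Int := Int.ofNat (Nat.sqrt t.toNat) with hs
    have hs0 : 0 ≤ s := Int.natCast_nonneg _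
    have hb : ((PySem.List.pyRange 1 s 1).map (fun i => s * i)).contains c =
        (decide (2 ≤ s) && decide (s ≤ c) && decide (c ≤ s * (s - 1)) &&
          (PySem.Int.mod c s == 0)) := by
      rw [Bool.eq_iff_iff]
      simp only [List.contains_iff_mem, mem_invalid_iff s c hs0,
        Bool.and_eq_true, decide_eq_true_eq, beq_iff_eq, and_assoc]
    rw [hb]
    cases hB : (decide (2 ≤ s) && decide (s ≤ c) && decide (c ≤ s * (s - 1)) &&
        (PySem.Int.mod c s == 0)) <;> simp
  · have h' : (c - 1 == b) = false := by simpa using h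
    simp [h', h]
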